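-- pv_equiv track=rewrite | github.com/craftedanomaly/foldercrafter | main.py | parse_indented_lines
-- ===== SOURCE A (Python) =====
-- def parse_indented_lines(text):
--     """Converts indented text to full paths."""
--     paths = []
--     stack = []
--
--     lines = text.splitlines()
--     for line in lines:
--         if not line.strip():
--             continue
--
--         indent = len(line) - len(line.lstrip())
--         name = line.strip()
--
--         while stack and stack[-1][0] >= indent:
--             stack.pop()
--
--         stack.append((indent, name))
--         full_path = "/".join([x[1] for x in stack])
--         paths.append(full_path)
--
--     return paths
-- ===== SOURCE B (Python) =====
-- def parse_indented_lines(text):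
--     """Converts indented text to full paths (recursive block decomposition)."""
--     items = [(len(l) - len(l.lstrip()), l.strip())
--              for l in text.splitlines() if l.strip()]
--
--     def emit(block, prefix):
--         if not block:
--             return []
--         (indent, name), rest = block[0], block[1:]
--         full = prefix + name
--         k = 0
--         while k < len(rest) and rest[k][0] > indent:
--             k += 1
--         return [full] + emit(rest[:k], full + "/") + emit(rest[k:], prefix)
--
--     return emit(items, "")
-- ===== Notes on version B (the rewrite author's own statement) =====
-- stated objective: alternative
-- what changed: Replaces A's explicit indent stack with pop-while-and-join per line by a recursive block decomposition: non-blank lines are tokenized once to (indent,name) pairs, then a recursion splits each block into the first line, its strictly-deeper child block (emitted with the accumulated prefix) and the remaining siblings.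
import Mathlib
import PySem

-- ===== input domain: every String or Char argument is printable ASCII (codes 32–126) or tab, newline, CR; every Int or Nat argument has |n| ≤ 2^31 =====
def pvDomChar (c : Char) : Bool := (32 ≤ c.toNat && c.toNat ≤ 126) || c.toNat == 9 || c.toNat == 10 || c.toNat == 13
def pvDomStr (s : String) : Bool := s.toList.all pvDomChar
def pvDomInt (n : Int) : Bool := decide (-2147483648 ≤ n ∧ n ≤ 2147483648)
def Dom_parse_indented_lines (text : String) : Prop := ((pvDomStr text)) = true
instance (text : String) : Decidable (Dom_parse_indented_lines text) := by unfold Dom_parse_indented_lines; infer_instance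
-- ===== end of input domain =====

-- B replaces A's explicit indent stack (pop-while + join per line) by a recursive
-- block decomposition over the tokenized non-blank lines; alternative, same cost.

-- ===== PORT A =====
-- The stack is kept top-first (Python's stack[-1] is the head); 'while stack and
-- stack[-1][0] >= indent: stack.pop()' is dropWhile on the head, and the join runs
-- over the reversed stack (Python's bottom-first order).
def parse_indented_lines (text : String) : List String :=
  let lines := PySem.Str.splitlines text
  (lines.foldl (fun (st : List String × List (Int × String)) line =>
    if PySem.Str.strip line = "" then st
    else
      let indent : Int := PySem.Str.len line - PySem.Str.len (PySem.Str.lstrip line)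
      let name := PySem.Str.strip line
      let stack := (indent, name) :: st.2.dropWhile (fun x => x.1 ≥ indent)
      let full := PySem.Str.join "/" ((stack.map Prod.snd).reverse)
      (st.1 ++ [full], stack)) ([], [])).1

-- ===== PORT B =====
-- Source B's comprehension: tokenize non-blank lines to (indent, name).
def pvItems (text : String) : List (Int × String) :=
  (PySem.Str.splitlines text).filterMap (fun l =>
    if PySem.Str.strip l = "" then none
    else some (PySem.Str.len l - PySem.Str.len (PySem.Str.lstrip l), PySem.Str.strip l))

-- Source B's emit: first line, its strictly-deeper child block, then the siblings.
def pvEmit : List (Int × String) → String → List String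
  | [], _ => []
  | (ind, name) :: rest, pre =>
    let full := pre ++ name
    full :: (pvEmit (rest.takeWhile (fun x => ind < x.1)) (full ++ "/") ++
             pvEmit (rest.dropWhile (fun x => ind < x.1)) pre)
termination_by l _ => l.length
decreasing_by
  · simp only [List.length_cons]
    exact Nat.lt_succ_of_le (List.takeWhile_prefix _).length_le
  · simp only [List.length_cons]
    exact Nat.lt_succ_of_le (List.length_dropWhile_le _ _)

def parse_indented_lines_alt (text : String) : List String :=
  pvEmit (pvItems text) ""

-- ===== PRECONDITION & SPEC =====
def Spec_parse_indented_lines (text : String) (out : List String) : Prop := out = parse_indented_lines_alt text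
instance (text : String) (out : List String) : Decidable (Spec_parse_indented_lines text out) := by unfold Spec_parse_indented_lines; infer_instance

-- ===== CLAIM (what is proved, stated in full; the proofs are below) =====
def Claim_equal_parse_indented_lines : Prop := ∀ (text : String), Dom_parse_indented_lines text → Spec_parse_indented_lines text (parse_indented_lines text)

-- ===== LEMMAS AND PROOFS =====

-- A's loop, rephrased over the item list (accumulator and stack made explicit).
def pvRun : List (Int × String) → List String → List (Int × String) → List String × List (Int × String)
  | [], acc, st => (acc, st)
  | (ind, name) :: rest, acc, st =>
    let stack := (ind, name) :: st.dropWhile (fun x => x.1 ≥ ind)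
    pvRun rest (acc ++ [PySem.Str.join "/" ((stack.map Prod.snd).reverse)]) stack

lemma pvRun_eq_foldl (l : List String) (acc : List String) (st : List (Int × String)) :
    (l.foldl (fun (st : List String × List (Int × String)) line =>
      if PySem.Str.strip line = "" then st
      else
        let indent : Int := PySem.Str.len line - PySem.Str.len (PySem.Str.lstrip line)
        let name := PySem.Str.strip line
        let stack := (indent, name) :: st.2.dropWhile (fun x => x.1 ≥ indent)
        let full := PySem.Str.join "/" ((stack.map Prod.snd).reverse)
        (st.1 ++ [full], stack)) (acc, st)) =
    pvRun (l.filterMap (fun l =>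
      if PySem.Str.strip l = "" then none
      else some (PySem.Str.len l - PySem.Str.len (PySem.Str.lstrip l), PySem.Str.strip l))) acc st := by
  induction l generalizing acc st with
  | nil => simp [pvRun]
  | cons x xs ih =>
    rw [List.foldl_cons, List.filterMap_cons]
    by_cases h : PySem.Str.strip x = ""
    · dsimp only
      rw [if_pos h, if_pos h]
      exact ih _ _
    · dsimp only
      rw [if_neg h, if_neg h, pvRun]
      exact ih _ _

lemma pvRun_acc (l : List (Int × String)) (acc : List String) (st : List (Int × String)) :
    pvRun l acc st = (acc ++ (pvRun l [] st).1, (pvRun l [] st).2) := by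
  induction l generalizing acc st with
  | nil => simp [pvRun]
  | cons x xs ih =>
    obtain ⟨ind, name⟩ := x
    rw [pvRun, pvRun]
    simp only [List.nil_append]
    rw [ih]
    conv_rhs => rw [ih]
    simp

lemma pvRun_append (l₁ l₂ : List (Int × String)) (acc : List String) (st : List (Int × String)) :
    pvRun (l₁ ++ l₂) acc st =
      pvRun l₂ (pvRun l₁ acc st).1 (pvRun l₁ acc st).2 := by
  induction l₁ generalizing acc st with
  | nil => simp [pvRun]
  | cons x xs ih =>
    obtain ⟨ind, name⟩ := x
    rw [List.cons_append, pvRun, pvRun, ih]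

-- the path "/".join prints over the reversed stack; pvPre st is B's prefix for it
def pvPre (st : List (Int × String)) : String :=
  match st with
  | [] => ""
  | _ => PySem.Str.join "/" ((st.map Prod.snd).reverse) ++ "/"

lemma pvCharsJoin_append_singleton (sep : List Char) (l : List (List Char)) (x : List Char) :
    PySem.Chars.join sep (l ++ [x]) =
      (if l = [] then x else PySem.Chars.join sep l ++ sep ++ x) := by
  induction l with
  | nil => simp [PySem.Chars.join_singleton]
  | cons a t ih =>
    cases t with
    | nil => simp [PySem.Chars.join_cons_cons, PySem.Chars.join_singleton]
    | cons b t' =>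
      simp only [List.cons_append] at ih ⊢
      rw [PySem.Chars.join_cons_cons, ih]
      simp [PySem.Chars.join_cons_cons]

lemma strJoin_append_singleton (l : List String) (x : String) :
    PySem.Str.join "/" (l ++ [x]) =
      (if l = [] then x else PySem.Str.join "/" l ++ "/" ++ x) := by
  refine String.toList_inj.mp ?_
  by_cases hl : l = []
  · subst hl; simp [PySem.Str.toList_join, PySem.Chars.join_singleton]
  · rw [if_neg hl]
    simp only [String.toList_append, PySem.Str.toList_join, List.map_append, List.map_cons,
      List.map_nil]
    rw [pvCharsJoin_append_singleton, if_neg (by simpa using hl)]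

lemma pvJoin_cons (ind : Int) (name : String) (st : List (Int × String)) :
    PySem.Str.join "/" ((((ind, name) :: st).map Prod.snd).reverse) = pvPre st ++ name := by
  rw [List.map_cons, List.reverse_cons, strJoin_append_singleton]
  cases st with
  | nil => simp [pvPre]
  | cons a t =>
    rw [if_neg (by simp)]
    rfl

lemma pvDropWhile_append_of_all {α : Type} (p : α → Bool) (g l : List α)
    (hg : ∀ x ∈ g, p x = true) : (g ++ l).dropWhile p = l.dropWhile p := by
  induction g with
  | nil => rfl
  | cons a t ih =>
    rw [List.cons_append, List.dropWhile_cons, if_pos (hg a (by simp))]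
    exact ih (fun x hx => hg x (by simp [hx]))

lemma pvDropWhile_head_false {α : Type} (p : α → Bool) (l : List α) (y : α) (o : List α)
    (h : l.dropWhile p = y :: o) : p y = false := by
  induction l with
  | nil => simp at h
  | cons a t ih =>
    rw [List.dropWhile_cons] at h
    by_cases ha : p a = true
    · exact ih (by rwa [if_pos ha] at h)
    · rw [if_neg ha] at h
      cases h
      simpa using ha

lemma pvRun_garbage (yi : Int) (yn : String) (o' : List (Int × String)) (g st : List (Int × String))
    (acc : List String) (hg : ∀ x ∈ g, yi ≤ x.1) :
    pvRun ((yi, yn) :: o') acc (g ++ st) = pvRun ((yi, yn) :: o') acc st := by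
  rw [pvRun, pvRun, pvDropWhile_append_of_all _ g st (fun x hx => by simpa using hg x hx)]

lemma pvMain : ∀ (n : ℕ) (l st : List (Int × String)) (i₀ : Int), l.length ≤ n →
    (∀ x ∈ l, i₀ < x.1) → (∀ x ∈ st, x.1 ≤ i₀) →
    (pvRun l [] st).1 = pvEmit l (pvPre st) ∧
    ∃ g, (pvRun l [] st).2 = g ++ st ∧ ∀ x ∈ g, i₀ < x.1 := by
  intro n
  induction n with
  | zero =>
    intro l st i₀ hn _ _
    have hl : l = [] := List.eq_nil_of_length_eq_zero (Nat.le_zero.mp hn)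
    subst hl
    exact ⟨by simp [pvRun, pvEmit], [], by simp [pvRun], by simp⟩
  | succ n ih =>
    intro l st i₀ hn hl hst
    cases l with
    | nil => exact ⟨by simp [pvRun, pvEmit], [], by simp [pvRun], by simp⟩
    | cons hd rest =>
      obtain ⟨ind, name⟩ := hd
      have hind : i₀ < ind := hl (ind, name) (by simp)
      have hdw : st.dropWhile (fun x => decide (x.1 ≥ ind)) = st := by
        cases st with
        | nil => rfl
        | cons s t =>
          rw [List.dropWhile_cons]
          have hs : s.1 ≤ i₀ := hst s (by simp)
          rw [if_neg (by simp; omega)]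
      have hrest : rest = rest.takeWhile (fun x => decide (ind < x.1))
          ++ rest.dropWhile (fun x => decide (ind < x.1)) :=
        (List.takeWhile_append_dropWhile).symm
      have hfull : PySem.Str.join "/" ((List.map Prod.snd ((ind, name) :: st)).reverse)
          = pvPre st ++ name := pvJoin_cons ind name st
      have hstack : ∀ x ∈ (ind, name) :: st, x.1 ≤ ind := by
        intro x hx
        rcases List.mem_cons.mp hx with h | h
        · subst h; exact le_refl _
        · exact le_of_lt (lt_of_le_of_lt (hst x h) hind)
      have hcmem : ∀ x ∈ rest.takeWhile (fun x => decide (ind < x.1)), ind < x.1 := by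
        intro x hx
        simpa using List.mem_takeWhile_imp hx
      have hclen : (rest.takeWhile (fun x => decide (ind < x.1))).length ≤ n := by
        have h1 := (List.takeWhile_prefix (l := rest) (p := fun x => decide (ind < x.1))).length_le
        simp only [List.length_cons] at hn; omega
      have holen : (rest.dropWhile (fun x => decide (ind < x.1))).length ≤ n := by
        have h1 := List.length_dropWhile_le (fun x => decide (ind < x.1)) rest
        simp only [List.length_cons] at hn; omega
      have homem : ∀ x ∈ rest.dropWhile (fun x => decide (ind < x.1)), i₀ < x.1 := by
        intro x hx
        exact hl x (List.mem_cons_of_mem _ ((List.dropWhile_sublist _).subset hx))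
      obtain ⟨Hc1, g, Hc2, hg⟩ :=
        ih (rest.takeWhile (fun x => decide (ind < x.1))) ((ind, name) :: st) ind hclen hcmem hstack
      have hpre : pvPre ((ind, name) :: st) = (pvPre st ++ name) ++ "/" := by
        show PySem.Str.join "/" ((List.map Prod.snd ((ind, name) :: st)).reverse) ++ "/" = _
        rw [hfull]
      rw [pvRun]
      simp only [List.nil_append, hdw]
      rw [pvRun_acc]
      have hrun : pvRun rest [] ((ind, name) :: st)
          = pvRun (rest.dropWhile (fun x => decide (ind < x.1)))
              (pvEmit (rest.takeWhile (fun x => decide (ind < x.1))) (pvPre ((ind, name) :: st)))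
              (g ++ (ind, name) :: st) := by
        conv_lhs => rw [hrest]
        rw [pvRun_append, Hc1, Hc2]
      rw [hrun]
      cases hcase : rest.dropWhile (fun x => decide (ind < x.1)) with
      | nil =>
        refine ⟨?_, g ++ [(ind, name)], by simp [pvRun], ?_⟩
        · simp only [pvRun]
          rw [pvEmit, hcase, hfull, hpre]
          simp [pvEmit]
        · intro x hx
          rcases List.mem_append.mp hx with h | h
          · exact lt_trans hind (hg x h)
          · simp at h; subst h; exact hind
      | cons y o' =>
        obtain ⟨yi, yn⟩ := y
        have hy : yi ≤ ind := by
          have := pvDropWhile_head_false _ rest _ _ hcase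
          simpa using this
        rw [hcase] at holen homem
        have habsorb : ∀ acc, pvRun ((yi, yn) :: o') acc (g ++ (ind, name) :: st)
            = pvRun ((yi, yn) :: o') acc st := by
          intro acc
          rw [show g ++ (ind, name) :: st = (g ++ [(ind, name)]) ++ st by simp]
          refine pvRun_garbage yi yn o' _ st acc ?_
          intro x hx
          rcases List.mem_append.mp hx with h | h
          · exact le_of_lt (lt_of_le_of_lt hy (hg x h))
          · simp at h; subst h; exact hy
        obtain ⟨Ho1, g₂, Ho2, hg₂⟩ := ih ((yi, yn) :: o') st i₀ holen homem hst
        rw [habsorb, pvRun_acc, Ho1, Ho2]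
        refine ⟨?_, g₂, rfl, hg₂⟩
        conv_rhs => rw [pvEmit]
        rw [hcase, hfull, hpre]
        simp

theorem parse_indented_lines_eq (text : String) :
    parse_indented_lines text = parse_indented_lines_alt text := by
  have hitems : ∀ x ∈ pvItems text, (-1 : Int) < x.1 := by
    intro x hx
    simp only [pvItems, List.mem_filterMap] at hx
    obtain ⟨l, -, hl⟩ := hx
    by_cases h : PySem.Str.strip l = ""
    · simp [h] at hl
    · rw [if_neg h] at hl
      obtain ⟨⟩ := hl
      have hlen : (PySem.Str.lstrip l).toList.length ≤ l.toList.length := by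
        rw [PySem.Str.toList_lstrip]
        exact List.length_dropWhile_le _ _
      simp only [PySem.Str.len_eq]
      omega
  obtain ⟨H, -⟩ := pvMain (pvItems text).length (pvItems text) [] (-1) (le_refl _)
    hitems (by intro x hx; simp at hx)
  have hfold := pvRun_eq_foldl (PySem.Str.splitlines text) [] []
  unfold parse_indented_lines parse_indented_lines_alt
  dsimp only
  rw [hfold]
  show (pvRun (pvItems text) [] []).1 = pvEmit (pvItems text) ""
  rw [H]
  rfl

-- ===== VERDICT (by name: the statement is the Claim_ definition above) =====
theorem parse_indented_lines_spec : Claim_equal_parse_indented_lines := by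
  intro text _
  exact parse_indented_lines_eq text
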